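-- pv_equiv track=rewrite | github.com/Bhasheyam/ALgorithms-PythonSolved | StringMinCounter.py | solution
-- ===== SOURCE A (Python) =====
-- def solution(A, B):
--     C=[]
--     for b in B:
--         Counter=0
--         for a in A:
--             temp1=(a.count(min(a)))
--             temp2=(b.count(min(b)))
--             if(temp2>temp1):
--                 Counter +=1
--         C.append(Counter)
--     return C
-- ===== SOURCE B (Python) =====
-- from bisect import bisect_left
--
--
-- def solution(A, B):
--     # No strings in A (every answer is 0) or no queries: nothing to scan.
--     if not A or not B:
--         return [0] * len(B)
--     # Precompute min-char counts for A once, sort, then binary-search each b.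
--     fs = sorted(a.count(min(a)) for a in A)
--     return [bisect_left(fs, b.count(min(b))) for b in B]
-- ===== Notes on version B (the rewrite author's own statement) =====
-- stated objective: faster
-- what changed: Instead of rescanning all of A (recomputing every min-char count) for each b, B computes each a's min-char count once, sorts those counts, and answers each b with a single bisect_left binary search.
import Mathlib
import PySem

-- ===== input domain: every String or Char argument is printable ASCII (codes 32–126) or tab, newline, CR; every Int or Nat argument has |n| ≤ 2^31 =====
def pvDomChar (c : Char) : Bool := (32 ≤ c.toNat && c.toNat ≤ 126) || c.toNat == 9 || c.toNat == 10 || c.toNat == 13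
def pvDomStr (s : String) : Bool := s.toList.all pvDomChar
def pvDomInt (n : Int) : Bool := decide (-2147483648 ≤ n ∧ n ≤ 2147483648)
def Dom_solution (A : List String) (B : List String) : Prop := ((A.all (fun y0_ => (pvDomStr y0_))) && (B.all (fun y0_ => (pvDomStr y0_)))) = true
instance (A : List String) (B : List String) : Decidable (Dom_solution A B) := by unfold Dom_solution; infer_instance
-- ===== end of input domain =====

-- B precomputes the per-string min-char count of every a in A once, sorts them, and answers
-- each query b with a binary search (bisect_left) instead of rescanning A; objective: faster.

-- s.count(min(s)) — shared helper of both Pythons; 0-branch is unreachable under Pre_.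
def cntMin (s : String) : Int :=
  match PySem.List.min? s.toList (fun c => c) with
  | some m => (PySem.Str.count s (String.mk [m]) : Int)
  | none => 0

-- ===== PORT A =====
def solution (A : List String) (B : List String) : List Int :=
  B.foldl (fun C b =>
    C ++ [A.foldl (fun Counter a =>
      if cntMin b > cntMin a then Counter + 1 else Counter) (0 : Int)]) []

-- ===== PORT B =====
def solution_alt (A : List String) (B : List String) : List Int :=
  if A = [] ∨ B = [] then B.map (fun _ => (0 : Int))
  else
    let fs := PySem.List.sorted (A.map cntMin) (fun x => x) false
    B.map (fun b => (PySem.List.bisectLeft fs (cntMin b) : Int))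

-- ===== PRECONDITION & SPEC =====
-- Pre_ excludes exactly the inputs where both Pythons raise ValueError: both lists nonempty
-- and an empty string present, so min('') is evaluated.
def Pre_solution (A : List String) (B : List String) : Prop :=
  A = [] ∨ B = [] ∨ ("" ∉ A ∧ "" ∉ B)
instance (A : List String) (B : List String) : Decidable (Pre_solution A B) := by unfold Pre_solution; infer_instance
def pvWitness_solution : List String × List String := (["aab", "zz"], ["bba", "a"])

def Spec_solution (A : List String) (B : List String) (out : List Int) : Prop := out = solution_alt A B
instance (A : List String) (B : List String) (out : List Int) : Decidable (Spec_solution A B out) := by unfold Spec_solution; infer_instance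

-- ===== CLAIM (what is proved, stated in full; the proofs are below) =====
def Claim_equal_solution : Prop := ∀ (A : List String) (B : List String), Dom_solution A B → Pre_solution A B → Spec_solution A B (solution A B)

-- ===== LEMMAS AND PROOFS =====

-- countP of a prefix-closed predicate on a list: if p holds exactly on the first k positions,
-- the count is k.
lemma countP_eq_of_prefix (p : Int → Bool) :
    ∀ (s : List Int) (k : Nat), k ≤ s.length →
      (∀ j (hj : j < s.length), p s[j] ↔ j < k) → s.countP p = k := by
  intro s
  induction s with
  | nil => intro k hk _; simpa using (Nat.le_zero.mp hk).symm
  | cons a t ih =>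
    intro k hk h
    cases k with
    | zero =>
      simp only [List.countP_cons]
      have ha : ¬ p a := by
        have := (h 0 (by simp)).not
        simpa using this
      have ht : t.countP p = 0 := by
        apply List.countP_eq_zero.mpr
        intro x hx
        obtain ⟨j, hj, rfl⟩ := List.getElem_of_mem hx
        have := (h (j + 1) (by simpa using Nat.succ_lt_succ hj)).not
        simpa using this
      simp [ht, ha]
    | succ k' =>
      have ha : p a := by
        have := h 0 (by simp)
        simpa using this
      have ht : t.countP p = k' := by
        apply ih k' (by simpa using Nat.succ_le_succ_iff.mp hk)
        intro j hj
        have := h (j + 1) (by simpa using Nat.succ_lt_succ hj)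
        simpa [Nat.succ_lt_succ_iff] using this
      simp [ha, ht]

-- bisect_left on a sorted list IS the number of elements strictly below x.
lemma bisectLeft_eq_countP (s : List Int) (x : Int)
    (hs : s.Pairwise (fun a b => a ≤ b)) :
    PySem.List.bisectLeft s x = s.countP (fun y => decide (y < x)) := by
  obtain ⟨hle, hlt, hge⟩ := PySem.List.bisectLeft_spec s x hs
  symm
  apply countP_eq_of_prefix _ s _ hle
  intro j hj
  simp only [decide_eq_true_eq]
  constructor
  · intro hpj
    by_contra hnk
    exact absurd (hge j hj (Nat.le_of_not_lt hnk)) (by omega)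
  · intro hk
    exact hlt j hj hk

lemma count_lt_eq_bisect (A : List String) (x : Int) :
    (A.countP (fun a => decide (cntMin a < x)) : Int)
      = (PySem.List.bisectLeft (PySem.List.sorted (A.map cntMin) (fun y => y) false) x : Int) := by
  have hperm : (PySem.List.sorted (A.map cntMin) (fun y => y) false).Perm (A.map cntMin) :=
    PySem.List.sorted_perm _ _ _
  rw [bisectLeft_eq_countP _ x (by simpa using PySem.List.sorted_pairwise (A.map cntMin) (fun y => y)),
      hperm.countP_eq, List.countP_map]
  rfl

-- A's port, rewritten as a map of per-query counts (holds for all inputs).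
lemma solutionA_eq_map (A : List String) (B : List String) :
    solution A B = B.map (fun b => (A.countP (fun a => decide (cntMin a < cntMin b)) : Int)) := by
  unfold solution
  rw [PySem.List.foldl_append_singleton_eq_map (fun b =>
    A.foldl (fun Counter a => if cntMin b > cntMin a then Counter + 1 else Counter) (0 : Int)) B []]
  simp only [List.nil_append]
  apply List.map_congr_left
  intro b _
  rw [PySem.List.foldl_ite_add_one (fun a => cntMin b > cntMin a) A 0]
  simp [gt_iff_lt]

-- ===== VERDICT (by name: the statement is the Claim_ definition above) =====
theorem solution_spec : Claim_equal_solution := by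
  intro A B _ _
  unfold Spec_solution solution_alt
  rw [solutionA_eq_map]
  by_cases h : A = [] ∨ B = []
  · rcases h with rfl | rfl <;> simp
  · simp only [h, if_false]
    apply List.map_congr_left
    intro b _
    simpa using count_lt_eq_bisect A (cntMin b)
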